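-- pv_equiv track=rewrite | github.com/EcoFriendlyAppleSu/algo | algoStudy/실전문제/연산자_끼워넣기.py | permutation_operators
-- ===== SOURCE A (Python) =====
-- def permutation_operators(operators, operators_size):
--     result = []
--     if operators_size == 0:
--         return [[]]
--     if operators_size == 1:
--         result = [[i] for i in operators]
--         return result
--     for i in range(len(operators)):
--         element = operators[i]
--         p = permutation_operators(operators[:i] + operators[i + 1:], operators_size - 1)
--         for rest in p:
--             result.append([element] + rest)
--     return result
-- ===== SOURCE B (Python) =====
-- def permutation_operators(operators, operators_size):
--     # Iterative level-by-level build of the same permutations in the same order.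
--     # Fewer than 0 or more than len(operators) picks admit no permutation.
--     if operators_size < 0 or operators_size > len(operators):
--         return []
--     work = [([], operators)]
--     for _ in range(operators_size):
--         new_work = []
--         for perm, remaining in work:
--             for j in range(len(remaining)):
--                 new_work.append((perm + [remaining[j]],
--                                  remaining[:j] + remaining[j + 1:]))
--         work = new_work
--     return [perm for perm, _ in work]
-- ===== Notes on version B (the rewrite author's own statement) =====
-- stated objective: alternative
-- what changed: Replaces A's head-selection recursion (re-entering the function for every chosen element) by an iterative breadth-first build: a worklist of (partial permutation, remaining elements) pairs extended level by level operators_size times, then projected to the permutation parts.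
import Mathlib
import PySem

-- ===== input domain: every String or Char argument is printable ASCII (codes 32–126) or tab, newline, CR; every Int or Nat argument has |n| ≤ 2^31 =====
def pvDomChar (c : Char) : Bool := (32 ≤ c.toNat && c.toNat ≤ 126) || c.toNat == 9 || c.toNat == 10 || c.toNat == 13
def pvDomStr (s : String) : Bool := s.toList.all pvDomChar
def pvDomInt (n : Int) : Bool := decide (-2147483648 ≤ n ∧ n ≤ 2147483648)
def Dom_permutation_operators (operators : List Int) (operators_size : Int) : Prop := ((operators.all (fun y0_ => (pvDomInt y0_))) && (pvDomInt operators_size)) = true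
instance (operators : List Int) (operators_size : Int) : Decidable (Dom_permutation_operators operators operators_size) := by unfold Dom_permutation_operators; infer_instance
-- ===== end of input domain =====

-- B replaces A's head-selection recursion by an iterative level-by-level worklist build
-- of the same permutations in the same order (objective: alternative decomposition).

-- ===== PORT A =====
-- indexing uses (pyGet? …).getD 0: every index taken from range(len …) is in range, so
-- Python never raises there and the default is unreachable; slices are PySem slices.
def permutation_operators (operators : List Int) (operators_size : Int) : List (List Int) :=
  if operators_size = 0 then [[]]
  else if operators_size = 1 then operators.map (fun i => [i])
  else
    (List.range operators.length).attach.foldl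
      (fun result i =>
        result ++
          (permutation_operators
              (PySem.List.slice operators none (some (i.1 : Int)) ++
               PySem.List.slice operators (some ((i.1 : Int) + 1)) none)
              (operators_size - 1)).map
            (fun rest => (PySem.List.pyGet? operators (i.1 : Int)).getD 0 :: rest))
      []
termination_by operators.length
decreasing_by
  have hi : i.1 < operators.length := List.mem_range.mp i.2
  have h1 : ((i.1 : Int) + 1) = ((i.1 + 1 : Nat) : Int) := by push_cast; ring
  rw [PySem.List.slice_to_natCast, h1, PySem.List.slice_from_natCast]
  simp only [List.length_append, List.length_take, List.length_drop]
  omega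

-- ===== PORT B =====
-- one round of the worklist loop: extend every (perm, remaining) pair by each
-- still-available element in index order (indices from range(len remaining): in range)
def pvStep (work : List (List Int × List Int)) : List (List Int × List Int) :=
  work.foldl
    (fun new_work pr =>
      new_work ++
        (List.range pr.2.length).map
          (fun (j : Nat) =>
            (pr.1 ++ [(PySem.List.pyGet? pr.2 (j : Int)).getD 0],
             PySem.List.slice pr.2 none (some (j : Int)) ++
               PySem.List.slice pr.2 (some ((j : Int) + 1)) none)))
    []

def permutation_operators_alt (operators : List Int) (operators_size : Int) : List (List Int) :=
  if operators_size < 0 ∨ operators_size > (operators.length : Int) then []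
  else
    ((List.range operators_size.toNat).foldl (fun work _ => pvStep work)
        [(([] : List Int), operators)]).map (fun pr => pr.1)

-- ===== PRECONDITION & SPEC =====
def Spec_permutation_operators (operators : List Int) (operators_size : Int) (out : List (List Int)) : Prop := out = permutation_operators_alt operators operators_size
instance (operators : List Int) (operators_size : Int) (out : List (List Int)) : Decidable (Spec_permutation_operators operators operators_size out) := by unfold Spec_permutation_operators; infer_instance

-- ===== CLAIM (what is proved, stated in full; the proofs are below) =====
def Claim_equal_permutation_operators : Prop := ∀ (operators : List Int) (operators_size : Int), Dom_permutation_operators operators operators_size → Spec_permutation_operators operators operators_size (permutation_operators operators operators_size)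

-- ===== LEMMAS AND PROOFS =====

-- remove the element at index j (what both Pythons' slice pair computes for j < len)
def pvRm (xs : List Int) (j : Nat) : List Int := xs.take j ++ xs.drop (j + 1)

theorem pvSlice_pair (xs : List Int) (j : Nat) :
    PySem.List.slice xs none (some (j : Int)) ++
      PySem.List.slice xs (some ((j : Int) + 1)) none = pvRm xs j := by
  have h1 : ((j : Int) + 1) = ((j + 1 : Nat) : Int) := by push_cast; ring
  rw [PySem.List.slice_to_natCast, h1, PySem.List.slice_from_natCast, pvRm]

-- reference function: A's recursion with a Nat depth, in flatMap form
def pvPA : List Int → Nat → List (List Int)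
  | _, 0 => [[]]
  | xs, k + 1 =>
      (List.range xs.length).flatMap
        (fun j => (pvPA (pvRm xs j) k).map (fun rest => xs[j]?.getD 0 :: rest))

theorem pvGet_eq (xs : List Int) (j : Nat) :
    (PySem.List.pyGet? xs (j : Int)).getD 0 = xs[j]?.getD 0 := by
  simp [PySem.List.pyGet?_natCast]

theorem attach_foldl_flatMap {a b : Type} (l : List a) (g : a → List b) :
    l.attach.foldl (fun acc t => acc ++ g t.1) ([] : List b) = l.flatMap g := by
  rw [← List.foldl_map (f := Subtype.val) (g := fun acc x => acc ++ g x),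
    List.attach_map_subtype_val, PySem.List.foldl_append_eq_flatMap, List.nil_append]

theorem permA_unfold (xs : List Int) (n : Int) (h0 : ¬ n = 0) (h1 : ¬ n = 1) :
    permutation_operators xs n =
      (List.range xs.length).flatMap
        (fun j => (permutation_operators (pvRm xs j) (n - 1)).map
          (fun rest => xs[j]?.getD 0 :: rest)) := by
  rw [permutation_operators, if_neg h0, if_neg h1,
    attach_foldl_flatMap (List.range xs.length) (fun (j : Nat) =>
      (permutation_operators
          (PySem.List.slice xs none (some (j : Int)) ++
           PySem.List.slice xs (some ((j : Int) + 1)) none) (n - 1)).map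
        (fun rest => (PySem.List.pyGet? xs (j : Int)).getD 0 :: rest))]
  exact congrArg (fun g => List.flatMap g (List.range xs.length))
    (funext fun j => by rw [pvSlice_pair, pvGet_eq])

theorem range_map_getD (l : List Int) (d : Int) :
    (List.range l.length).map (fun j => l[j]?.getD d) = l := by
  induction l with
  | nil => simp
  | cons a t ih =>
      rw [List.length_cons, List.range_succ_eq_map, List.map_cons, List.map_map]
      simpa using ih

theorem range_map_single (xs : List Int) :
    (List.range xs.length).map (fun j : Nat => ([xs[j]?.getD 0] : List Int)) =
      xs.map (fun i => [i]) := by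
  rw [show (fun j : Nat => ([xs[j]?.getD 0] : List Int)) =
      ((fun i : Int => [i]) ∘ (fun j : Nat => xs[j]?.getD 0)) from rfl,
    ← List.map_map, range_map_getD]

theorem permA_neg (xs : List Int) (n : Int) (hn : n < 0) :
    permutation_operators xs n = [] := by
  induction hL : xs.length using Nat.strong_induction_on generalizing xs n with
  | _ L ih =>
  subst hL
  rw [permA_unfold xs n (by omega) (by omega)]
  apply List.flatMap_eq_nil_iff.mpr
  intro j hj
  have hj' : j < xs.length := by simpa using hj
  rw [ih (pvRm xs j).length (by simp [pvRm]; omega) _ _ (by omega) rfl]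
  simp

theorem permA_eq_pvPA (k : Nat) : ∀ (xs : List Int) (n : Int), 0 ≤ n → n.toNat = k →
    permutation_operators xs n = pvPA xs k := by
  induction k with
  | zero =>
      intro xs n h0 hk
      have : n = 0 := by omega
      subst this
      rw [permutation_operators]
      simp [pvPA]
  | succ m ih =>
      intro xs n h0 hk
      have hn : n = (m : Int) + 1 := by omega
      subst hn
      by_cases hm : m = 0
      · subst hm
        rw [permutation_operators, if_neg (by omega), if_pos (by omega), pvPA]
        rw [show (fun j => (pvPA (pvRm xs j) 0).map (fun rest => xs[j]?.getD 0 :: rest)) =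
            (fun j : Nat => [([xs[j]?.getD 0] : List Int)]) from funext fun j => by simp [pvPA]]
        rw [← List.map_eq_flatMap, range_map_single]
      · rw [permA_unfold xs _ (by omega) (by omega), pvPA]
        refine congrArg (fun g => List.flatMap g (List.range xs.length)) (funext fun j => ?_)
        rw [ih (pvRm xs j) ((m : Int) + 1 - 1) (by omega) (by omega)]

theorem pvStep_eq (work : List (List Int × List Int)) :
    pvStep work = work.flatMap
      (fun pr => (List.range pr.2.length).map
        (fun j => (pr.1 ++ [pr.2[j]?.getD 0], pvRm pr.2 j))) := by
  rw [pvStep, PySem.List.foldl_append_eq_flatMap, List.nil_append]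
  refine congrArg (fun g => List.flatMap g work) (funext fun pr => ?_)
  exact congrArg (fun g => List.map g (List.range pr.2.length))
    (funext fun j => by rw [pvSlice_pair, pvGet_eq])

theorem pvPA_gt (k : Nat) : ∀ (xs : List Int), xs.length < k → pvPA xs k = [] := by
  induction k with
  | zero => intro xs h; omega
  | succ m ih =>
      intro xs h
      rw [pvPA]
      apply List.flatMap_eq_nil_iff.mpr
      intro j hj
      have hj' : j < xs.length := by simpa using hj
      rw [ih (pvRm xs j) (by simp [pvRm]; omega)]
      simp

theorem foldl_const_iter (k : Nat) (w : List (List Int × List Int)) :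
    (List.range k).foldl (fun work _ => pvStep work) w = pvStep^[k] w := by
  induction k generalizing w with
  | zero => simp
  | succ m ih =>
      rw [List.range_succ_eq_map, List.foldl_cons, List.foldl_map, ih,
        ← Function.iterate_succ_apply]

theorem pvIter_main (k : Nat) : ∀ (w : List (List Int × List Int)),
    (pvStep^[k] w).map (fun pr => pr.1) =
      w.flatMap (fun pr => (pvPA pr.2 k).map (fun rest => pr.1 ++ rest)) := by
  induction k with
  | zero =>
      intro w
      simp only [Function.iterate_zero, id_eq, pvPA]
      induction w with
      | nil => simp
      | cons a t iht => simp [iht]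
  | succ m ih =>
      intro w
      rw [Function.iterate_succ_apply, ih, pvStep_eq, List.flatMap_assoc]
      refine congrArg (fun g => List.flatMap g w) (funext fun pr => ?_)
      rw [pvPA, List.flatMap_map, List.map_flatMap]
      refine congrArg (fun g => List.flatMap g (List.range pr.2.length)) (funext fun j => ?_)
      simp [List.map_map, Function.comp_def, List.append_assoc]

-- ===== VERDICT (by name: the statement is the Claim_ definition above) =====
theorem permutation_operators_spec : Claim_equal_permutation_operators := by
  intro operators operators_size _hdom
  unfold Spec_permutation_operators permutation_operators_alt
  by_cases hneg : operators_size < 0 ∨ operators_size > (operators.length : Int)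
  · rw [if_pos hneg]
    rcases hneg with hneg | hgt
    · exact permA_neg _ _ hneg
    · rw [permA_eq_pvPA operators_size.toNat operators operators_size (by omega) rfl]
      exact pvPA_gt _ _ (by omega)
  · rw [if_neg hneg, foldl_const_iter, pvIter_main]
    simp only [List.flatMap_cons, List.flatMap_nil, List.append_nil, List.nil_append,
      List.map_id']
    exact (permA_eq_pvPA operators_size.toNat operators operators_size (by omega) rfl).trans
      (by simp)
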